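-- pv_equiv track=rewrite | github.com/Guanymsl/Python | DS/HW/PA5_2024/main.py | check
-- ===== SOURCE A (Python) =====
-- from bisect import bisect_left, bisect_right
--
-- def update(bit, k, n):
--     while k <= n:
--         bit[k] += 1
--         k += k & (-k)
--
-- def query(bit, k):
--     s = 0
--     while k > 0:
--         s += bit[k]
--         k -= k & (-k)
--     return s
--
-- def check(mid, n, k, zero, prefix, unique):
--     cnt = 0
--     bit = [0] * (n + 1)
--     update(bit, zero + 1, n)
--     for i in range(1, n + 1):
--         cnt += query(bit, bisect_right(unique, unique[prefix[i]] - mid - 1))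
--         update(bit, prefix[i] + 1, n)
--     return cnt < k
-- ===== SOURCE B (Python) =====
-- from bisect import bisect_right, insort_right
--
-- def check(mid, n, k, zero, prefix, unique):
--     cnt = 0
--     s = [zero + 1]
--     for i in range(1, n + 1):
--         boundary = bisect_right(unique, unique[prefix[i]] - mid - 1)
--         cnt += bisect_right(s, boundary)
--         insort_right(s, prefix[i] + 1)
--     return cnt < k
-- ===== Notes on version B (the rewrite author's own statement) =====
-- stated objective: alternative
-- what changed: Replaced A's Fenwick (binary-indexed) tree with its bit-trick update/query loops by an explicit sorted list maintained with insort_right and queried with bisect_right (count of elements <= boundary).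
import Mathlib
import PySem

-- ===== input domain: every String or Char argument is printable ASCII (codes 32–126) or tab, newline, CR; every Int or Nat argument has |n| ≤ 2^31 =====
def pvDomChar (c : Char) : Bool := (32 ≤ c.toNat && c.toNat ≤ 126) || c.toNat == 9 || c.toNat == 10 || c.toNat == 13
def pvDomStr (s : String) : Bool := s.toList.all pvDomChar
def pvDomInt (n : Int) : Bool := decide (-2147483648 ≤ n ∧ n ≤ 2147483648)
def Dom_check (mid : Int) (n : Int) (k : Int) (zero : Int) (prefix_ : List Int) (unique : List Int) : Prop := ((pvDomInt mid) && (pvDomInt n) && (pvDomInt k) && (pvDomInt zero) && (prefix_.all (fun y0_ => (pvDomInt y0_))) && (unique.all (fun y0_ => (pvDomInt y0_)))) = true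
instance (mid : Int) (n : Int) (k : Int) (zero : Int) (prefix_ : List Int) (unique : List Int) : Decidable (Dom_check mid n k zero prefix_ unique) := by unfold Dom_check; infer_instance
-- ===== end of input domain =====

-- B replaces A's Fenwick (binary-indexed) tree by an explicit sorted list queried with
-- bisect_right and extended with insort_right: an alternative data structure, same results.

-- ===== PORT A =====

-- Python `k & (-k)` (the Fenwick lowbit step)
def pvLowbit (kk : Int) : Int := PySem.Int.band kk (-kk)

-- `while k <= n: bit[k] += 1; k += k & (-k)`.  The write `bit[k] += 1` is ported as
-- List.set at k.toNat, exact for the in-range nonnegative k that Pre_ guarantees.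
-- Fuel (n + 1 - k).toNat suffices: k grows by lowbit k ≥ 1 each turn while k ≤ n (k ≥ 1 under Pre_).
def pvUpdate (bit : List Int) (k n : Int) : Nat → List Int
  | 0 => bit
  | fuel + 1 =>
    if k ≤ n then
      pvUpdate ((bit.set k.toNat (PySem.List.pyGetD bit k 0 + 1))) (k + pvLowbit k) n fuel
    else bit

def pyUpdate (bit : List Int) (k n : Int) : List Int := pvUpdate bit k n (n + 1 - k).toNat

-- `s = 0; while k > 0: s += bit[k]; k -= k & (-k); return s`.
-- Fuel k.toNat suffices: k shrinks by lowbit k ≥ 1 each turn while k > 0.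
def pvQuery (bit : List Int) (k : Int) : Nat → Int
  | 0 => 0
  | fuel + 1 =>
    if 0 < k then PySem.List.pyGetD bit k 0 + pvQuery bit (k - pvLowbit k) fuel
    else 0

def pyQuery (bit : List Int) (k : Int) : Int := pvQuery bit k k.toNat

-- one turn of A's `for i in range(1, n + 1)` loop; state = (cnt, bit)
def stepA (mid : Int) (n : Int) (prefix_ : List Int) (unique : List Int)
    (st : Int × List Int) (i : Int) : Int × List Int :=
  let p := PySem.List.pyGetD prefix_ i 0
  (st.1 + pyQuery st.2 ((PySem.List.bisectRight unique (PySem.List.pyGetD unique p 0 - mid - 1) : Nat) : Int),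
   pyUpdate st.2 (p + 1) n)

def check (mid : Int) (n : Int) (k : Int) (zero : Int) (prefix_ : List Int) (unique : List Int) : Bool :=
  decide (((PySem.List.pyRange 1 (n + 1) 1).foldl (stepA mid n prefix_ unique)
    (0, pyUpdate (List.replicate (n + 1).toNat 0) (zero + 1) n)).1 < k)

-- ===== PORT B =====

-- bisect.insort_right(xs, x) = xs.insert(bisect_right(xs, x), x)
def pvInsort (xs : List Int) (x : Int) : List Int :=
  PySem.List.insert xs ((PySem.List.bisectRight xs x : Nat) : Int) x

-- one turn of B's loop; state = (cnt, s) with s the sorted list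
def stepB (mid : Int) (n : Int) (prefix_ : List Int) (unique : List Int)
    (st : Int × List Int) (i : Int) : Int × List Int :=
  let boundary := ((PySem.List.bisectRight unique (PySem.List.pyGetD unique (PySem.List.pyGetD prefix_ i 0) 0 - mid - 1) : Nat) : Int)
  (st.1 + ((PySem.List.bisectRight st.2 boundary : Nat) : Int),
   pvInsort st.2 (PySem.List.pyGetD prefix_ i 0 + 1))

def check_alt (mid : Int) (n : Int) (k : Int) (zero : Int) (prefix_ : List Int) (unique : List Int) : Bool :=
  decide (((PySem.List.pyRange 1 (n + 1) 1).foldl (stepB mid n prefix_ unique)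
    (0, [zero + 1])).1 < k)

-- ===== PRECONDITION & SPEC =====
-- Pre_ excludes exactly the inputs on which A never returns a value: it raises IndexError
-- (prefix shorter than n+1, a prefix entry outside unique, a bisect boundary beyond the
-- n+1-entry tree so query reads bit[j] with j > n, or n < 0 ≤ n - zero - 1 indexing the
-- empty tree) or loops forever (a nonpositive BIT position, i.e. zero < 0 or a negative
-- prefix entry, drives update's k to 0 where k & -k = 0).  On every input where A returns,
-- Pre_ holds.
def Pre_check (mid : Int) (n : Int) (k : Int) (zero : Int) (prefix_ : List Int) (unique : List Int) : Prop :=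
  (n < 0 ∧ n ≤ zero) ∨ (n = 0 ∧ 0 ≤ zero) ∨
  (0 < n ∧ 0 ≤ zero ∧ n + 1 ≤ (prefix_.length : Int) ∧
  ∀ p ∈ (prefix_.drop 1).take n.toNat, 0 ≤ p ∧ p < (unique.length : Int) ∧
    ((PySem.List.bisectRight unique (PySem.List.pyGetD unique p 0 - mid - 1) : Nat) : Int) ≤ n)

instance (mid : Int) (n : Int) (k : Int) (zero : Int) (prefix_ : List Int) (unique : List Int) : Decidable (Pre_check mid n k zero prefix_ unique) := by unfold Pre_check; infer_instance

def pvWitness_check : Int × Int × Int × Int × List Int × List Int := (0, 2, 3, 0, [0, 0, 1], [1, 2])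

def Spec_check (mid : Int) (n : Int) (k : Int) (zero : Int) (prefix_ : List Int) (unique : List Int) (out : Bool) : Prop := out = check_alt mid n k zero prefix_ unique
instance (mid : Int) (n : Int) (k : Int) (zero : Int) (prefix_ : List Int) (unique : List Int) (out : Bool) : Decidable (Spec_check mid n k zero prefix_ unique out) := by unfold Spec_check; infer_instance

-- ===== CLAIM (what is proved, stated in full; the proofs are below) =====
def Claim_equal_check : Prop := ∀ (mid : Int) (n : Int) (k : Int) (zero : Int) (prefix_ : List Int) (unique : List Int), Dom_check mid n k zero prefix_ unique → Pre_check mid n k zero prefix_ unique → Spec_check mid n k zero prefix_ unique (check mid n k zero prefix_ unique)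

-- ===== LEMMAS AND PROOFS =====
lemma nat_land_odd_pred (m : ℕ) (hm : m % 2 = 1) : m &&& (m - 1) = m - 1 := by
  apply Nat.eq_of_testBit_eq
  intro i
  cases i with
  | zero => simp [Nat.testBit_zero]; omega
  | succ i =>
      rw [Nat.testBit_land, Nat.testBit_succ, Nat.testBit_succ]
      have : (m - 1) / 2 = m / 2 := by omega
      rw [this, Bool.and_self]

lemma nat_land_double (j : ℕ) (hj : 0 < j) : (2 * j) &&& (2 * j - 1) = 2 * (j &&& (j - 1)) := by
  apply Nat.eq_of_testBit_eq
  intro i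
  cases i with
  | zero => simp [Nat.testBit_zero]
  | succ i =>
      rw [Nat.testBit_land, Nat.testBit_succ, Nat.testBit_succ, Nat.testBit_succ]
      have h1 : (2 * j) / 2 = j := by omega
      have h2 : (2 * j - 1) / 2 = j - 1 := by omega
      have h3 : (2 * (j &&& (j - 1))) / 2 = j &&& (j - 1) := by omega
      rw [h1, h2, h3, Nat.testBit_land]

lemma nat_lowbit_spec : ∀ (m : ℕ), 0 < m →
    ∃ a : ℕ, m - (m &&& (m - 1)) = 2 ^ a ∧ 2 ^ a ∣ m ∧ ¬ 2 ^ (a + 1) ∣ m := by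
  intro m
  induction m using Nat.strong_induction_on with
  | _ m ih =>
    intro hm
    rcases Nat.even_or_odd m with he | ho
    · obtain ⟨j, hj⟩ := he
      have hj' : m = 2 * j := by omega
      have hjpos : 0 < j := by omega
      obtain ⟨a, ha1, ha2, ha3⟩ := ih j (by omega) hjpos
      refine ⟨a + 1, ?_, ?_, ?_⟩
      · have hland : m &&& (m - 1) = 2 * (j &&& (j - 1)) := by
          rw [hj']; exact nat_land_double j hjpos
        have hle : j &&& (j - 1) ≤ j := Nat.and_le_left
        rw [hland, hj', pow_succ]
        omega
      · rw [hj', pow_succ, mul_comm (2 ^ a) 2]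
        exact mul_dvd_mul_left 2 ha2
      · rw [hj']
        intro hdvd
        apply ha3
        have : 2 * 2 ^ (a + 1) ∣ 2 * j := by
          rwa [show 2 * 2 ^ (a + 1) = 2 ^ (a + 1 + 1) from (pow_succ' 2 (a+1)).symm]
        exact (mul_dvd_mul_iff_left (by norm_num : (2:ℕ) ≠ 0)).mp this
    · have hmo : m % 2 = 1 := Nat.odd_iff.mp ho
      refine ⟨0, ?_, one_dvd m, ?_⟩
      · rw [nat_land_odd_pred m hmo]; omega
      · simpa using Nat.two_dvd_ne_zero.mpr hmo


lemma pvLowbit_spec (kk : Int) (h : 1 ≤ kk) :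
    ∃ a : ℕ, pvLowbit kk = 2 ^ a ∧ ((2 : Int) ^ a ∣ kk) ∧ ¬ ((2 : Int) ^ (a + 1) ∣ kk) := by
  have h0 : ¬ (0 ≤ -kk) := by omega
  have hband : pvLowbit kk = ((kk.toNat - (kk.toNat &&& (kk - 1).toNat) : ℕ) : Int) := by
    unfold pvLowbit PySem.Int.band
    simp only [if_pos (by omega : (0:Int) ≤ kk), if_neg h0, neg_neg]
  have htn : (kk - 1).toNat = kk.toNat - 1 := by omega
  obtain ⟨a, ha1, ha2, ha3⟩ := nat_lowbit_spec kk.toNat (by omega)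
  refine ⟨a, ?_, ?_, ?_⟩
  · rw [hband, htn, ha1]; push_cast; ring
  · have : ((2:Int) ^ a ∣ (kk.toNat : Int)) := by exact_mod_cast Int.natCast_dvd_natCast.mpr ha2
    simpa [Int.toNat_of_nonneg (by omega : (0:Int) ≤ kk)] using this
  · intro hdvd
    apply ha3
    have hk : ((kk.toNat : Int)) = kk := Int.toNat_of_nonneg (by omega)
    rw [← hk] at hdvd
    exact_mod_cast hdvd

lemma odd_quot (b : ℕ) (kk : Int) (hd : (2:Int) ^ b ∣ kk) (hnd : ¬ (2:Int) ^ (b+1) ∣ kk) :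
    ∃ u : Int, kk = 2 ^ b * u ∧ u % 2 = 1 := by
  obtain ⟨u, hu⟩ := hd
  refine ⟨u, hu, ?_⟩
  rcases Int.even_or_odd u with ⟨v, hv⟩ | hodd
  · exfalso; apply hnd
    exact ⟨v, by rw [hu, hv, pow_succ]; ring⟩
  · obtain ⟨v, hv⟩ := hodd; omega

lemma path_step (p kk : Int) (hp : 1 ≤ p) (hk : 1 ≤ kk)
    (a b : ℕ) (hLa : (2:Int) ^ a ∣ p) (hNa : ¬ (2:Int) ^ (a+1) ∣ p)
    (hLb : (2:Int) ^ b ∣ kk) (hNb : ¬ (2:Int) ^ (b+1) ∣ kk) :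
    (kk - 2 ^ b < p ∧ p ≤ kk) ↔
      (kk = p ∨ (kk - 2 ^ b < p + 2 ^ a ∧ p + 2 ^ a ≤ kk)) := by
  have hpa : (0:Int) < 2 ^ a := by positivity
  have hpb : (0:Int) < 2 ^ b := by positivity
  constructor
  · rintro ⟨h1, h2⟩
    by_cases heq : kk = p
    · exact Or.inl heq
    right
    have hlt : p < kk := lt_of_le_of_ne h2 (fun h => heq h.symm)
    have hr : (0:Int) < kk - p := by omega
    have hab : a < b := by
      by_contra hab
      push_neg at hab   -- b ≤ a
      have hbp : (2:Int) ^ b ∣ p := dvd_trans (pow_dvd_pow 2 hab) hLa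
      have : (2:Int) ^ b ∣ (kk - p) := dvd_sub hLb hbp
      have := Int.le_of_dvd hr this
      omega
    have hak : (2:Int) ^ a ∣ kk := dvd_trans (pow_dvd_pow 2 (le_of_lt hab)) hLb
    have hdr : (2:Int) ^ a ∣ (kk - p) := dvd_sub hak hLa
    have := Int.le_of_dvd hr hdr
    constructor <;> omega
  · rintro (heq | ⟨h1, h2⟩)
    · subst heq
      constructor <;> omega
    constructor
    · -- kk - 2^b < p
      by_contra hcon
      push_neg at hcon   -- p ≤ kk - 2^b
      obtain ⟨u, hu, huo⟩ := odd_quot b kk hLb hNb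
      by_cases hab : a ≤ b
      · have hak : (2:Int) ^ a ∣ kk := dvd_trans (pow_dvd_pow 2 hab) hLb
        have hds : (2:Int) ^ a ∣ (kk - p) := dvd_sub hak hLa
        have hdb : (2:Int) ^ a ∣ ((kk - p) - 2 ^ b) := dvd_sub hds (pow_dvd_pow 2 hab)
        have hz : (kk - p) - 2 ^ b = 0 := by
          rcases lt_or_ge 0 ((kk - p) - 2 ^ b) with hpos | hle
          · have := Int.le_of_dvd hpos hdb; omega
          · rcases lt_or_ge ((kk - p) - 2 ^ b) 0 with hneg | _
            · omega
            · omega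
        -- p = kk - 2^b, u odd ⇒ 2^(b+1) ∣ p
        have hpval : p = 2 ^ b * (u - 1) := by subst hu; linear_combination -hz
        have : (2:Int) ^ (b+1) ∣ p := by
          refine ⟨(u - 1) / 2, ?_⟩
          have h2 : u - 1 = 2 * ((u - 1) / 2) := by omega
          generalize hd : (u - 1) / 2 = d at h2 ⊢
          rw [hpval, h2, pow_succ]; ring
        have : (2:Int) ^ (a+1) ∣ p := dvd_trans (pow_dvd_pow 2 (by omega)) this
        exact hNa this
      · push_neg at hab   -- b < a
        have hba1 : (2:Int) ^ (b+1) ∣ p := dvd_trans (pow_dvd_pow 2 (by omega)) hLa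
        obtain ⟨w, hw⟩ := hba1
        have hs : kk - p = 2 ^ b * (u - 2 * w) := by
          rw [hu, hw, pow_succ]; ring
        have hto : (u - 2 * w) % 2 = 1 := by omega
        have h2ab : (2:Int) ^ a = 2 ^ b * 2 ^ (a - b) := by
          rw [← pow_add]; congr 1; omega
        have htge : 2 ^ (a - b) ≤ u - 2 * w := by
          have hs2 : 2 ^ b * 2 ^ (a - b) ≤ 2 ^ b * (u - 2 * w) := by
            rw [← h2ab, ← hs]; omega
          exact le_of_mul_le_mul_left hs2 hpb
        have heven : (2:Int) ^ (a - b) % 2 = 0 := by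
          have : a - b = (a - b - 1) + 1 := by omega
          rw [this, pow_succ]; omega
        have htgt : 2 ^ (a - b) + 1 ≤ u - 2 * w := by omega
        have : 2 ^ b * (2 ^ (a - b) + 1) ≤ 2 ^ b * (u - 2 * w) :=
          mul_le_mul_of_nonneg_left htgt (le_of_lt hpb)
        rw [mul_add, ← h2ab, ← hs, mul_one] at this
        omega
    · omega

lemma pvLowbit_pos (kk : Int) (h : 1 ≤ kk) : 1 ≤ pvLowbit kk := by
  obtain ⟨a, ha, _, _⟩ := pvLowbit_spec kk h
  rw [ha]; exact one_le_pow₀ one_le_two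

lemma pvLowbit_le (kk : Int) (h : 1 ≤ kk) : pvLowbit kk ≤ kk := by
  obtain ⟨a, ha, hd, _⟩ := pvLowbit_spec kk h
  rw [ha]; exact Int.le_of_dvd (by omega) hd
def cntIn (M : List Int) (lo hi : Int) : Int := (M.countP (fun p => lo < p && p ≤ hi) : Int)

lemma cntIn_empty (M : List Int) (lo hi : Int) (h : hi ≤ lo) : cntIn M lo hi = 0 := by
  unfold cntIn
  have : M.countP (fun p => lo < p && p ≤ hi) = 0 := by
    apply List.countP_eq_zero.mpr
    intro p _
    simp only [Bool.and_eq_true, decide_eq_true_eq]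
    omega
  rw [this]; rfl

lemma cntIn_cons (q : Int) (M : List Int) (lo hi : Int) :
    cntIn (q :: M) lo hi = cntIn M lo hi + (if lo < q ∧ q ≤ hi then 1 else 0) := by
  unfold cntIn
  rw [List.countP_cons]
  by_cases h : lo < q ∧ q ≤ hi
  · rw [if_pos h]; simp only [h.1, h.2, decide_true, Bool.and_self, if_pos]; push_cast; ring
  · rw [if_neg h]
    have hb : (decide (lo < q) && decide (q ≤ hi)) = false := by
      rcases not_and_or.mp h with h1 | h1 <;> simp [h1]
    rw [hb]; simp

lemma cntIn_split (M : List Int) (lo mi hi : Int) (h1 : lo ≤ mi) (h2 : mi ≤ hi) :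
    cntIn M lo hi = cntIn M lo mi + cntIn M mi hi := by
  induction M with
  | nil => simp [cntIn]
  | cons q M ih =>
      rw [cntIn_cons, cntIn_cons, cntIn_cons, ih]
      split_ifs <;> omega

def BitRepr (bit : List Int) (M : List Int) (n : Int) : Prop :=
  ∀ kk : Int, 1 ≤ kk → kk ≤ n → PySem.List.pyGetD bit kk 0 = cntIn M (kk - pvLowbit kk) kk

lemma bitRepr_init (n : Int) : BitRepr (List.replicate (n + 1).toNat 0) [] n := by
  intro kk h1 h2
  rw [PySem.List.pyGetD_of_nonneg _ _ (by omega)]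
  have : (List.replicate (n + 1).toNat (0:Int)).getD kk.toNat 0 = 0 := by
    rcases lt_or_ge kk.toNat (n+1).toNat with h | h
    · rw [List.getD_eq_getElem _ _ (by simpa using h)]; simp
    · rw [List.getD_eq_default _ _ (by simpa using h)]
  rw [this]; rfl

lemma query_eq (bit M : List Int) (n : Int) (hr : BitRepr bit M n) :
    ∀ (fuel : Nat) (q : Int), 0 ≤ q → q ≤ n → q.toNat ≤ fuel →
      pvQuery bit q fuel = cntIn M 0 q := by
  intro fuel
  induction fuel with
  | zero =>
      intro q h0 hn hf
      have : q = 0 := by omega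
      subst this
      rw [cntIn_empty M 0 0 le_rfl]; rfl
  | succ fuel ih =>
      intro q h0 hn hf
      by_cases hq : 0 < q
      · have hlb1 : 1 ≤ pvLowbit q := pvLowbit_pos q (by omega)
        have hlb2 : pvLowbit q ≤ q := pvLowbit_le q (by omega)
        show (if 0 < q then PySem.List.pyGetD bit q 0 + pvQuery bit (q - pvLowbit q) fuel else 0) = _
        rw [if_pos hq, hr q (by omega) hn,
            ih (q - pvLowbit q) (by omega) (by omega) (by omega),
            cntIn_split M 0 (q - pvLowbit q) q (by omega) (by omega)]
        ring
      · have : q = 0 := by omega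
        subst this
        show (if (0:Int) < 0 then _ else 0) = _
        rw [if_neg (by omega), cntIn_empty M 0 0 le_rfl]

lemma pyGetD_set (bit : List Int) (i : Nat) (v : Int) (kk : Int) (hk : 0 ≤ kk) :
    PySem.List.pyGetD (bit.set i v) kk 0 =
      if i = kk.toNat ∧ i < bit.length then v else PySem.List.pyGetD bit kk 0 := by
  rw [PySem.List.pyGetD_of_nonneg _ _ hk, PySem.List.pyGetD_of_nonneg _ _ hk,
      List.getD_eq_getElem?_getD, List.getD_eq_getElem?_getD, List.getElem?_set]
  by_cases h1 : i = kk.toNat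
  · rw [if_pos h1, h1]
    by_cases h2 : kk.toNat < bit.length
    · rw [if_pos h2, if_pos ⟨rfl, h2⟩]; rfl
    · have hnone : bit[kk.toNat]? = none := by
        rw [List.getElem?_eq_none_iff]; omega
      rw [if_neg h2, if_neg (fun hc => h2 hc.2), hnone]
  · rw [if_neg h1, if_neg (fun hc => h1 hc.1)]

lemma update_pres (n : Int) :
    ∀ (fuel : Nat) (bit : List Int) (p : Int), bit.length = (n + 1).toNat → 1 ≤ p →
      (n + 1 - p).toNat ≤ fuel →
      (pvUpdate bit p n fuel).length = bit.length ∧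
      ∀ kk : Int, 1 ≤ kk → kk ≤ n →
        PySem.List.pyGetD (pvUpdate bit p n fuel) kk 0 =
          PySem.List.pyGetD bit kk 0 + (if kk - pvLowbit kk < p ∧ p ≤ kk then 1 else 0) := by
  intro fuel
  induction fuel with
  | zero =>
      intro bit p hlen hp hf
      constructor
      · rfl
      · intro kk h1 h2
        rw [if_neg (by omega), show pvUpdate bit p n 0 = bit from rfl]
        ring
  | succ fuel ih =>
      intro bit p hlen hp hf
      by_cases hpn : p ≤ n
      · have hlb : 1 ≤ pvLowbit p := pvLowbit_pos p hp
        have hstep : pvUpdate bit p n (fuel + 1) =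
            pvUpdate (bit.set p.toNat (PySem.List.pyGetD bit p 0 + 1)) (p + pvLowbit p) n fuel := by
          show (if p ≤ n then _ else bit) = _
          rw [if_pos hpn]
        obtain ⟨ihlen, ihget⟩ := ih (bit.set p.toNat (PySem.List.pyGetD bit p 0 + 1)) (p + pvLowbit p)
          (by rw [List.length_set]; exact hlen) (by omega) (by omega)
        constructor
        · rw [hstep, ihlen, List.length_set]
        · intro kk h1 h2
          rw [hstep, ihget kk h1 h2,
              pyGetD_set bit p.toNat (PySem.List.pyGetD bit p 0 + 1) kk (by omega)]
          obtain ⟨a, hLa, hda, hna⟩ := pvLowbit_spec p hp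
          obtain ⟨b, hLb, hdb, hnb⟩ := pvLowbit_spec kk (by omega)
          have hiff := path_step p kk hp (by omega) a b hda hna hdb hnb
          rw [← hLa, ← hLb] at hiff
          by_cases hkp : kk = p
          · subst hkp
            have c1 : kk.toNat = kk.toNat ∧ kk.toNat < bit.length := ⟨rfl, by omega⟩
            have c2 : kk - pvLowbit kk < kk ∧ kk ≤ kk := by
              have hlbk : 1 ≤ pvLowbit kk := pvLowbit_pos kk (by omega)
              exact ⟨by omega, le_rfl⟩
            have c3 : ¬ (kk - pvLowbit kk < kk + pvLowbit kk ∧ kk + pvLowbit kk ≤ kk) := by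
              rintro ⟨-, hcon⟩
              have hlbk : 1 ≤ pvLowbit kk := pvLowbit_pos kk (by omega)
              omega
            rw [if_pos c1, if_pos c2, if_neg c3]
            ring
          · have hne : ¬ (p.toNat = kk.toNat ∧ p.toNat < bit.length) := by
              intro hcon
              exact hkp (by omega)
            rw [if_neg hne]
            have hiff2 : (kk - pvLowbit kk < p ∧ p ≤ kk) ↔
                (kk - pvLowbit kk < p + pvLowbit p ∧ p + pvLowbit p ≤ kk) := by
              rw [hiff]
              constructor
              · rintro (h | h)
                · exact absurd h hkp
                · exact h
              · exact Or.inr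
            rw [if_congr hiff2 rfl rfl]
      · have hstep : pvUpdate bit p n (fuel + 1) = bit := by
          show (if p ≤ n then _ else bit) = _
          rw [if_neg hpn]
        rw [hstep]
        exact ⟨rfl, fun kk h1 h2 => by rw [if_neg (by omega)]; ring⟩

-- holds for every p ≥ 1: for p > n the update loop is a no-op in A and an element p > n
-- is never counted by any in-range Fenwick cell (hi = kk ≤ n < p)
lemma bitRepr_update (bit M : List Int) (n p : Int) (hr : BitRepr bit M n)
    (hl : bit.length = (n + 1).toNat) (hp : 1 ≤ p) :
    BitRepr (pyUpdate bit p n) (p :: M) n ∧ (pyUpdate bit p n).length = (n + 1).toNat := by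
  obtain ⟨hlen, hget⟩ := update_pres n (n + 1 - p).toNat bit p hl hp le_rfl
  constructor
  · intro kk h1 h2
    show PySem.List.pyGetD (pvUpdate bit p n (n + 1 - p).toNat) kk 0 = _
    rw [hget kk h1 h2, hr kk h1 h2, cntIn_cons]
  · show (pvUpdate bit p n (n + 1 - p).toNat).length = _
    rw [hlen, hl]

lemma bisectRightLoop_le (xs : List Int) (x : Int) :
    ∀ (fuel lo hi : Nat), lo ≤ hi → PySem.List.bisectRightLoop xs x fuel lo hi ≤ hi := by
  intro fuel
  induction fuel with
  | zero => intro lo hi h; simpa [PySem.List.bisectRightLoop] using h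
  | succ fuel ih =>
      intro lo hi h
      rw [PySem.List.bisectRightLoop]
      by_cases hlh : lo < hi
      · rw [if_pos hlh]
        cases hx : xs[(lo + hi) / 2]? with
        | none => exact h
        | some y =>
            show (if x < y then PySem.List.bisectRightLoop xs x fuel lo ((lo + hi) / 2)
                else PySem.List.bisectRightLoop xs x fuel ((lo + hi) / 2 + 1) hi) ≤ hi
            by_cases hxy : x < y
            · rw [if_pos hxy]
              exact le_trans (ih lo ((lo + hi) / 2) (by omega)) (by omega)
            · rw [if_neg hxy]
              exact ih ((lo + hi) / 2 + 1) hi (by omega)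
      · rw [if_neg hlh]; exact h

lemma bisectRight_le_length (xs : List Int) (x : Int) :
    PySem.List.bisectRight xs x ≤ xs.length :=
  bisectRightLoop_le xs x xs.length 0 xs.length (Nat.zero_le _)

lemma bisectRight_count (S : List Int) (x : Int) (hs : S.Pairwise (· ≤ ·)) :
    PySem.List.bisectRight S x = S.countP (fun p => decide (p ≤ x)) := by
  obtain ⟨hle, hlow, hhigh⟩ := PySem.List.bisectRight_spec S x hs
  set r := PySem.List.bisectRight S x with hr
  have hcount : S.countP (fun p => decide (p ≤ x)) =
      (S.take r).countP (fun p => decide (p ≤ x)) + (S.drop r).countP (fun p => decide (p ≤ x)) := by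
    rw [← List.countP_append, List.take_append_drop]
  have h1 : (S.take r).countP (fun p => decide (p ≤ x)) = r := by
    have hall : ∀ a ∈ S.take r, (fun p => decide (p ≤ x)) a = true := by
      intro a ha
      obtain ⟨i, hi, hget⟩ := List.mem_iff_getElem.mp ha
      have hi' : i < S.length := by
        have := List.length_take (i := r) (l := S); omega
      rw [List.getElem_take] at hget
      have := hlow i hi' (by have := List.length_take (i := r) (l := S); omega)
      simp only [decide_eq_true_eq]
      omega
    rw [List.countP_eq_length.mpr hall, List.length_take]
    omega
  have h2 : (S.drop r).countP (fun p => decide (p ≤ x)) = 0 := by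
    rw [List.countP_eq_zero]
    intro a ha
    obtain ⟨i, hi, hget⟩ := List.mem_iff_getElem.mp ha
    have hlen : (S.drop r).length = S.length - r := List.length_drop
    rw [List.getElem_drop] at hget
    have := hhigh (r + i) (by omega) (by omega)
    simp only [decide_eq_true_eq]
    omega
  omega

lemma bisectRight_cnt (S M : List Int) (x : Int) (hs : S.Pairwise (· ≤ ·))
    (hperm : S.Perm M) (hpos : ∀ p ∈ M, 1 ≤ p) (_hx : 0 ≤ x) :
    ((PySem.List.bisectRight S x : Nat) : Int) = cntIn M 0 x := by
  rw [bisectRight_count S x hs, hperm.countP_eq]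
  unfold cntIn
  congr 1
  apply List.countP_congr
  intro p hp
  have := hpos p hp
  simp only [decide_eq_true_eq, Bool.and_eq_true]
  omega

lemma insort_eq (S : List Int) (x : Int) :
    pvInsort S x = S.take (PySem.List.bisectRight S x) ++ x :: S.drop (PySem.List.bisectRight S x) := by
  unfold pvInsort
  exact PySem.List.insert_natCast S _ x (bisectRight_le_length S x)

lemma insort_perm (S : List Int) (x : Int) : (pvInsort S x).Perm (x :: S) := by
  rw [insort_eq]
  refine List.perm_middle.trans ?_
  rw [List.take_append_drop]

lemma insort_sorted (S : List Int) (x : Int) (hs : S.Pairwise (· ≤ ·)) :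
    (pvInsort S x).Pairwise (· ≤ ·) := by
  obtain ⟨hle, hlow, hhigh⟩ := PySem.List.bisectRight_spec S x hs
  rw [insort_eq]
  set r := PySem.List.bisectRight S x with hr
  rw [List.pairwise_append]
  refine ⟨List.Pairwise.sublist (List.take_sublist r S) hs, ?_, ?_⟩
  · rw [List.pairwise_cons]
    refine ⟨?_, List.Pairwise.sublist (List.drop_sublist r S) hs⟩
    intro b hb
    obtain ⟨i, hi, hget⟩ := List.mem_iff_getElem.mp hb
    have hlen : (S.drop r).length = S.length - r := List.length_drop
    rw [List.getElem_drop] at hget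
    have := hhigh (r + i) (by omega) (by omega)
    omega
  · intro a ha b hb
    obtain ⟨i, hi, hgeta⟩ := List.mem_iff_getElem.mp ha
    have hi' : i < S.length := by
      have := List.length_take (i := r) (l := S); omega
    rw [List.getElem_take] at hgeta
    have hax : a ≤ x := by
      have := hlow i hi' (by have := List.length_take (i := r) (l := S); omega)
      omega
    rcases List.mem_cons.mp hb with hbx | hbd
    · omega
    · obtain ⟨j, hj, hgetb⟩ := List.mem_iff_getElem.mp hbd
      have hlen : (S.drop r).length = S.length - r := List.length_drop
      rw [List.getElem_drop] at hgetb
      have := hhigh (r + j) (by omega) (by omega)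
      omega

lemma prefix_mem (prefix_ : List Int) (n i : Int) (h1 : 1 ≤ i) (h2 : i ≤ n)
    (hlen : n + 1 ≤ (prefix_.length : Int)) :
    PySem.List.pyGetD prefix_ i 0 ∈ (prefix_.drop 1).take n.toNat := by
  rw [PySem.List.pyGetD_of_nonneg _ _ (by omega)]
  have hi : i.toNat < prefix_.length := by omega
  rw [List.getD_eq_getElem _ _ hi]
  apply List.mem_iff_getElem.mpr
  have hlt : (List.take n.toNat (List.drop 1 prefix_)).length = min n.toNat (prefix_.length - 1) := by
    rw [List.length_take, List.length_drop]
  refine ⟨i.toNat - 1, by omega, ?_⟩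
  rw [List.getElem_take, List.getElem_drop]
  simp only [show 1 + (i.toNat - 1) = i.toNat from by omega]

lemma loop_eq (mid n : Int) (prefix_ unique : List Int)
    (hlen : n + 1 ≤ (prefix_.length : Int))
    (hpre : ∀ p ∈ (prefix_.drop 1).take n.toNat, 0 ≤ p ∧ p < (unique.length : Int) ∧
      ((PySem.List.bisectRight unique (PySem.List.pyGetD unique p 0 - mid - 1) : Nat) : Int) ≤ n) :
    ∀ (fuel : Nat) (i : Int), 1 ≤ i → (n + 1 - i).toNat = fuel →
      ∀ (cnt : Int) (bit S M : List Int), BitRepr bit M n → bit.length = (n + 1).toNat →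
        S.Pairwise (· ≤ ·) → S.Perm M → (∀ q ∈ M, 1 ≤ q) →
        ((PySem.List.pyRange i (n + 1) 1).foldl (stepA mid n prefix_ unique) (cnt, bit)).1 =
        ((PySem.List.pyRange i (n + 1) 1).foldl (stepB mid n prefix_ unique) (cnt, S)).1 := by
  intro fuel
  induction fuel with
  | zero =>
      intro i h1 hfe cnt bit S M _ _ _ _ _
      rw [PySem.List.pyRange_one_eq_nil (by omega)]
      rfl
  | succ fuel ih =>
      intro i h1 hfe cnt bit S M hrepr hblen hsort hperm hpos
      have hin : i < n + 1 := by omega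
      rw [PySem.List.pyRange_one_cons hin]
      simp only [List.foldl_cons]
      set p := PySem.List.pyGetD prefix_ i 0 with hp
      have hmem := prefix_mem prefix_ n i h1 (by omega) hlen
      obtain ⟨hp0, hplt, hbdn⟩ := hpre p hmem
      set bd := ((PySem.List.bisectRight unique (PySem.List.pyGetD unique p 0 - mid - 1) : Nat) : Int) with hbd
      have hbd0 : 0 ≤ bd := by positivity
      have hqA : pyQuery bit bd = cntIn M 0 bd := by
        rw [pyQuery]
        exact query_eq bit M n hrepr bd.toNat bd hbd0 hbdn le_rfl
      have hqB : ((PySem.List.bisectRight S bd : Nat) : Int) = cntIn M 0 bd :=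
        bisectRight_cnt S M bd hsort hperm hpos hbd0
      have hA : stepA mid n prefix_ unique (cnt, bit) i = (cnt + cntIn M 0 bd, pyUpdate bit (p + 1) n) := by
        simp only [stepA]
        rw [← hp, ← hbd, hqA]
      have hB : stepB mid n prefix_ unique (cnt, S) i = (cnt + cntIn M 0 bd, pvInsort S (p + 1)) := by
        simp only [stepB]
        rw [← hp, ← hbd, hqB]
      rw [hA, hB]
      obtain ⟨hrepr', hblen'⟩ := bitRepr_update bit M n (p + 1) hrepr hblen (by omega)
      exact ih (i + 1) (by omega) (by omega) (cnt + cntIn M 0 bd)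
        (pyUpdate bit (p + 1) n) (pvInsort S (p + 1)) ((p + 1) :: M)
        hrepr' hblen'
        (insort_sorted S (p + 1) hsort)
        ((insort_perm S (p + 1)).trans (hperm.cons (p + 1)))
        (by
          intro q hq
          rcases List.mem_cons.mp hq with h | h
          · omega
          · exact hpos q h)

-- ===== VERDICT (by name: the statement is the Claim_ definition above) =====
theorem check_spec : Claim_equal_check := by
  intro mid n k zero prefix_ unique hdom hpre
  rcases hpre with ⟨hn, hz⟩ | ⟨hn, hz⟩ | ⟨hn, hz, hplen, hvals⟩
  · -- n < 0: the range is empty in both programs and both return `decide (0 < k)`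
    unfold Spec_check check check_alt
    rw [PySem.List.pyRange_one_eq_nil (by omega)]
    rfl
  · -- n = 0: likewise, the loop body is never entered
    unfold Spec_check check check_alt
    rw [PySem.List.pyRange_one_eq_nil (by omega)]
    rfl
  unfold Spec_check check check_alt
  obtain ⟨hrepr1, hlen1⟩ := bitRepr_update (List.replicate (n + 1).toNat 0) [] n (zero + 1)
    (bitRepr_init n) List.length_replicate (by omega)
  have hloop := loop_eq mid n prefix_ unique hplen hvals n.toNat 1 le_rfl (by omega) 0
    (pyUpdate (List.replicate (n + 1).toNat 0) (zero + 1) n) [zero + 1] [zero + 1]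
    hrepr1 hlen1 (by simp : List.Pairwise (· ≤ ·) [zero + 1]) (List.Perm.refl _)
    (by intro q hq; have := List.mem_singleton.mp hq; omega)
  rw [hloop]
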